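-- pv_equiv track=rewrite | github.com/colinpannikkat/adventofcode2025 | day4/sol.py | part_two
-- ===== SOURCE A (Python) =====
-- def part_one(grid: list[list[str]]) -> tuple[int, list[list[str]]]:
--
--     rolls = 0
--     m, n = len(grid), len(grid[0])
--
--     out_grid = [row[:] for row in grid]  # copy for output
--
--     for j in range(m):
--         for i in range(n):
--
--             if grid[j][i] != '@':
--                 continue
--
--             count = 0
--
--             # Check up
--             if j > 0:
--                 if grid[j-1][i] == '@':
--                     count += 1
--
--             # Check down
--             if j < m - 1:
--                 if grid[j+1][i] == '@':
--                     count += 1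
--
--             # Check left
--             if i > 0:
--                 if grid[j][i - 1] == '@':
--                     count += 1
--
--             # Check right
--             if i < n - 1:
--                 if grid[j][i + 1] == '@':
--                     count += 1
--
--             # Check up/left
--             if j > 0 and i > 0:
--                 if grid[j - 1][i - 1] == '@':
--                     count += 1
--
--             # Check up/right
--             if j > 0 and i < n - 1:
--                 if grid[j - 1][i + 1] == '@':
--                     count += 1
--
--             # Check down/left
--             if j < m - 1 and i > 0:
--                 if grid[j + 1][i - 1] == '@':
--                     count += 1
--
--             # Check down/right
--             if j < m - 1 and i < n - 1:
--                 if grid[j + 1][i + 1] == '@':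
--                     count += 1
--
--             if count < 4:
--                 rolls += 1
--                 out_grid[j][i] = 'x'
--
--     return rolls, out_grid
--
-- def part_two(grid: list[list[str]]) -> int:
--
--     rolls = 0
--
--     while True:
--         count, grid = part_one(grid)
--
--         if count == 0:
--             break
--
--         rolls += count
--
--     return rolls
-- ===== SOURCE B (Python) =====
-- _OFFS = [(-1, -1), (-1, 0), (-1, 1), (0, -1), (0, 1), (1, -1), (1, 0), (1, 1)]
--
-- def _deg(live, c):
--     return sum((c[0] + dj, c[1] + di) in live for dj, di in _OFFS)
--
-- def part_two(grid: list[list[str]]) -> int: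
--     # Worklist peeling: remove one deficient cell at a time, pushing only the
--     # neighbours whose degree drops below 4.  The surviving set is the unique
--     # maximal subset in which every cell has >= 4 live neighbours (the "4-core"),
--     # which is independent of removal order, so the total number of removals
--     # equals A's round-by-round simultaneous count.
--     m, n = len(grid), len(grid[0])
--     live = {(j, i) for j in range(m) for i in range(n) if grid[j][i] == '@'}
--     stack = [(j, i) for j in range(m) for i in range(n)
--              if grid[j][i] == '@' and _deg(live, (j, i)) < 4]
--     removed = 0
--     while stack:
--         c = stack.pop()
--         if c not in live:
--             continue
--         live.remove(c)
--         removed += 1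
--         for dj, di in _OFFS:
--             nb = (c[0] + dj, c[1] + di)
--             if nb in live and _deg(live, nb) < 4:
--                 stack.append(nb)
--     return removed
-- ===== Notes on version B (the rewrite author's own statement) =====
-- stated objective: alternative
-- what changed: B never re-runs global rounds: it peels cells one at a time from a worklist (initially the deficient cells), and on each single removal pushes only the up-to-8 neighbours that just became deficient; the survivors form the order-independent 4-core, so the removal count matches A's simultaneous round-based rescans, which copy and rewrite the whole grid every round.
import Mathlib
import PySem

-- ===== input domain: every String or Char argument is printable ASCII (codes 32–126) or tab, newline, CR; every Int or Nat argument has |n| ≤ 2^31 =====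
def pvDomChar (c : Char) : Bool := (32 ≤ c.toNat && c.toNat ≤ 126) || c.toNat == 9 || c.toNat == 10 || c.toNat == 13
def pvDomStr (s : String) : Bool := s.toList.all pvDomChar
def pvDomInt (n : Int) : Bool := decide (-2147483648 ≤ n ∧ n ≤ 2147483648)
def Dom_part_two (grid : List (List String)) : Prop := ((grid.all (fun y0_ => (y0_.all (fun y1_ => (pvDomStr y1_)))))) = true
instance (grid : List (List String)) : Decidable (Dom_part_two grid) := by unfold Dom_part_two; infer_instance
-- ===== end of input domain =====

-- B replaces A's repeated whole-grid rounds by one-at-a-time worklist peeling (push the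
-- neighbours that become deficient on each single removal); objective: alternative algorithm.

-- ===== PORT A =====
-- shared helper: grid[j][i] with out-of-range reads giving "" (never reached on Pre_ inputs)
def pvCell (g : List (List String)) (j i : Nat) : String := (g.getD j []).getD i ""

-- shared helper (the '@'-coordinate comprehension of B; A's port uses only its LENGTH, as the
-- termination measure of the while-loop): the '@'-coordinates of the first n columns, scan order
def pvCells (g : List (List String)) : List (Int × Int) :=
  (List.range g.length).flatMap (fun j =>
    ((List.range (g.headD []).length).filter (fun i => pvCell g j i == "@")).map
      (fun (i : Nat) => ((j : Int), (i : Int))))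

-- the eight neighbour checks of part_one, in source order (up, down, left, right, ul, ur, dl, dr)
def pvCnt (g : List (List String)) (m n j i : Nat) : Nat :=
  (if 0 < j ∧ pvCell g (j-1) i = "@" then 1 else 0) +
  (if j < m - 1 ∧ pvCell g (j+1) i = "@" then 1 else 0) +
  (if 0 < i ∧ pvCell g j (i-1) = "@" then 1 else 0) +
  (if i < n - 1 ∧ pvCell g j (i+1) = "@" then 1 else 0) +
  (if 0 < j ∧ 0 < i ∧ pvCell g (j-1) (i-1) = "@" then 1 else 0) +
  (if 0 < j ∧ i < n - 1 ∧ pvCell g (j-1) (i+1) = "@" then 1 else 0) +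
  (if j < m - 1 ∧ 0 < i ∧ pvCell g (j+1) (i-1) = "@" then 1 else 0) +
  (if j < m - 1 ∧ i < n - 1 ∧ pvCell g (j+1) (i+1) = "@" then 1 else 0)

-- body of part_one's inner loop: state (rolls, out_grid)
def pvStepA (g : List (List String)) (m n j : Nat) (st : Int × List (List String)) (i : Nat) :
    Int × List (List String) :=
  if pvCell g j i ≠ "@" then st
  else if pvCnt g m n j i < 4 then (st.1 + 1, st.2.set j ((st.2.getD j []).set i "x")) else st

def part_one (g : List (List String)) : Int × List (List String) :=
  (List.range g.length).foldl
    (fun st j => (List.range (g.headD []).length).foldl (pvStepA g g.length (g.headD []).length j) st)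
    (0, g)

-- A's while-loop with accumulator `rolls`; the dite is only a termination guard (its else-branch
-- is dead: part_one strictly shrinks the '@'-set whenever it removed something, proved below)
def part_two_go (g : List (List String)) (rolls : Int) : Int :=
  let r := part_one g
  if r.1 = 0 then rolls
  else if h : (pvCells r.2).length < (pvCells g).length then part_two_go r.2 (rolls + r.1)
  else rolls + r.1
termination_by (pvCells g).length

def part_two (grid : List (List String)) : Int := part_two_go grid 0

-- ===== PORT B =====
def pvOffs : List (Int × Int) := [(-1,-1),(-1,0),(-1,1),(0,-1),(0,1),(1,-1),(1,0),(1,1)]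

-- B's _deg: number of the 8 neighbours that are live
def pvDeg (S : List (Int × Int)) (c : Int × Int) : Nat :=
  pvOffs.countP (fun o => decide ((c.1 + o.1, c.2 + o.2) ∈ S))

-- B's while-loop over the worklist `stack` (top of the Python stack = head here; a pop takes the
-- head, the pushes of one removal are prepended last-pushed-first)
def part_two_alt_go (live : List (Int × Int)) (stack : List (Int × Int)) (removed : Int) : Int :=
  match stack with
  | [] => removed
  | c :: rest =>
    if c ∈ live then
      part_two_alt_go (live.erase c)
        (((pvOffs.map (fun o => (c.1 + o.1, c.2 + o.2))).filter
            (fun nb => decide (nb ∈ live.erase c ∧ pvDeg (live.erase c) nb < 4))).reverse ++ rest)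
        (removed + 1)
    else part_two_alt_go live rest removed
termination_by 9 * live.length + stack.length
decreasing_by
  · have h1 : (live.erase c).length = live.length - 1 := List.length_erase_of_mem (by assumption)
    have h2 : ((pvOffs.map (fun o => (c.1 + o.1, c.2 + o.2))).filter
        (fun nb => decide (nb ∈ live.erase c ∧ pvDeg (live.erase c) nb < 4))).length ≤ 8 := by
      refine le_trans (List.length_filter_le _ _) ?_
      rw [List.length_map, pvOffs]
      decide
    have h3 : 0 < live.length := List.length_pos_of_mem (by assumption)
    simp only [List.length_append, List.length_reverse, List.length_cons]
    omega
  · simp only [List.length_cons]; omega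

def part_two_alt (grid : List (List String)) : Int :=
  part_two_alt_go (pvCells grid)
    ((pvCells grid).filter (fun c => decide (pvDeg (pvCells grid) c < 4))) 0

-- ===== PRECONDITION & SPEC =====
-- Pre_ excludes exactly the inputs where Python A raises an IndexError: the empty grid
-- (grid[0]) and grids with a row shorter than the first row (grid[j][i] for i < n).
def Pre_part_two (grid : List (List String)) : Prop :=
  grid ≠ [] ∧ ∀ row ∈ grid, (grid.headD []).length ≤ row.length
instance (grid : List (List String)) : Decidable (Pre_part_two grid) := by
  unfold Pre_part_two; infer_instance

def pvWitness_part_two : List (List String) := [["@", "@"], ["@", "@"]]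

def Spec_part_two (grid : List (List String)) (out : Int) : Prop := out = part_two_alt grid
instance (grid : List (List String)) (out : Int) : Decidable (Spec_part_two grid out) := by
  unfold Spec_part_two; infer_instance

-- ===== CLAIM (what is proved, stated in full; the proofs are below) =====
def Claim_equal_part_two : Prop :=
  ∀ (grid : List (List String)), Dom_part_two grid → Pre_part_two grid →
    Spec_part_two grid (part_two grid)

-- ===== LEMMAS AND PROOFS =====

-- the simultaneous round-based loop A reduces to (proof-side only)
def pvRounds (S : List (Int × Int)) (removed : Int) : Int :=
  if (S.filter (fun c => decide (pvDeg S c < 4))).isEmpty then removed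
  else if h : (S.filter (fun c => decide (¬ pvDeg S c < 4))).length < S.length then
    pvRounds (S.filter (fun c => decide (¬ pvDeg S c < 4)))
      (removed + (S.filter (fun c => decide (pvDeg S c < 4))).length)
  else removed + (S.filter (fun c => decide (pvDeg S c < 4))).length
termination_by S.length
decreasing_by
  simp only [List.length_unattach, ← List.countP_eq_length_filter, Nat.not_lt]
  rw [List.countP_attach (l := S) (p := fun c : Int × Int => decide (4 ≤ pvDeg S c))]
  simp only [← List.countP_eq_length_filter, Nat.not_lt] at h
  exact h

-- the 4-core of S: iterate the simultaneous filter to its fixpoint (proof-side only)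
def pvFix (S : List (Int × Int)) : List (Int × Int) :=
  if hD : (S.filter (fun c => decide (pvDeg S c < 4))) = [] then S
  else pvFix (S.filter (fun c => decide (¬ pvDeg S c < 4)))
termination_by S.length
decreasing_by
  simp only [List.length_unattach, ← List.countP_eq_length_filter, Nat.not_lt]
  rw [List.countP_attach (l := S) (p := fun c : Int × Int => decide (4 ≤ pvDeg S c))]
  rw [List.countP_eq_length_filter]
  obtain ⟨x, hx⟩ := List.exists_mem_of_ne_nil _ hD
  obtain ⟨hxS, hxd⟩ := List.mem_filter.mp hx
  refine List.length_filter_lt_length_iff_exists.mpr ⟨x, hxS, ?_⟩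
  simp only [decide_eq_true_eq] at hxd ⊢
  omega

-- a cell of g is doomed in this round
def pvDoom (g : List (List String)) (m n j i : Nat) : Bool :=
  (pvCell g j i == "@") && decide (pvCnt g m n j i < 4)

-- row j of g after the first k inner-loop iterations
def pvRowK (g : List (List String)) (m n j k : Nat) (row : List String) : List String :=
  row.mapIdx (fun i s => if i < k ∧ s = "@" ∧ pvCnt g m n j i < 4 then "x" else s)

-- the whole grid after one round
def pvPeel (g : List (List String)) : List (List String) :=
  g.mapIdx (fun j row => pvRowK g g.length (g.headD []).length j (g.headD []).length row)

lemma pvSetGetDSelf {A : Type} (l : List A) (j : Nat) (d : A) : l.set j (l.getD j d) = l := by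
  induction l generalizing j with
  | nil => rfl
  | cons a tl ih =>
    cases j with
    | zero => rfl
    | succ j => simpa [List.getD_eq_getElem?_getD] using ih j

lemma pvGetDN {A : Type} (l : List A) (i : Nat) (d : A) (h : l.length ≤ i) : l.getD i d = d := by
  simp [List.getD_eq_getElem?_getD, List.getElem?_eq_none h]

lemma pvGetDS {A : Type} (l : List A) (i : Nat) (d : A) (h : i < l.length) : l.getD i d = l[i] := by
  simp [List.getD_eq_getElem?_getD, List.getElem?_eq_getElem h]

lemma pvGetDLt {A : Type} (l : List A) (j : Nat) (d : A) (h : l.getD j d ≠ d) : j < l.length := by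
  by_contra hc
  exact h (pvGetDN l j d (le_of_not_gt hc))

lemma pvCell_spec (g : List (List String)) (j i : Nat) (h : pvCell g j i = "@") :
    j < g.length ∧ i < (g.getD j []).length := by
  have hi : i < (g.getD j []).length := by
    by_contra hc
    rw [pvCell, pvGetDN _ _ _ (le_of_not_gt hc)] at h
    exact absurd h (by decide)
  refine ⟨?_, hi⟩
  have hne : g.getD j [] ≠ [] := by
    intro hemp; rw [hemp] at hi; simp at hi
  exact pvGetDLt g j [] hne

lemma pvCell_eq_getElem (g : List (List String)) (j i : Nat) (h : i < (g.getD j []).length) :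
    pvCell g j i = (g.getD j [])[i] := pvGetDS _ _ _ h

lemma pvRowK_zero (g : List (List String)) (m n j : Nat) (row : List String) :
    pvRowK g m n j 0 row = row := by
  apply List.ext_getElem?
  intro t
  simp [pvRowK, List.getElem?_mapIdx]

lemma pvRowK_succ_not (g : List (List String)) (m n j k : Nat)
    (h : ¬(pvCell g j k = "@" ∧ pvCnt g m n j k < 4)) :
    pvRowK g m n j (k+1) (g.getD j []) = pvRowK g m n j k (g.getD j []) := by
  apply List.ext_getElem?
  intro t
  simp only [pvRowK, List.getElem?_mapIdx]
  by_cases hlen : t < (g.getD j []).length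
  · rw [List.getElem?_eq_getElem hlen]
    simp only [Option.map_some, Option.some.injEq]
    by_cases htk : t = k
    · subst htk
      rw [if_neg (fun hx => h ⟨by rw [pvCell_eq_getElem g j t hlen]; exact hx.2.1, hx.2.2⟩),
        if_neg (fun hx => absurd hx.1 (lt_irrefl t))]
    · simp only [show (t < k + 1) ↔ (t < k) from by omega]
  · rw [List.getElem?_eq_none (le_of_not_gt hlen)]
    rfl

lemma pvRowK_succ_doom (g : List (List String)) (m n j k : Nat)
    (h1 : pvCell g j k = "@") (h2 : pvCnt g m n j k < 4) :
    pvRowK g m n j (k+1) (g.getD j []) = (pvRowK g m n j k (g.getD j [])).set k "x" := by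
  have hk : k < (g.getD j []).length := (pvCell_spec g j k h1).2
  apply List.ext_getElem?
  intro t
  by_cases htk : t = k
  · subst htk
    rw [List.getElem?_set_self (by simpa [pvRowK] using hk)]
    simp only [pvRowK, List.getElem?_mapIdx]
    rw [List.getElem?_eq_getElem hk]
    simp only [Option.map_some, Option.some.injEq]
    rw [if_pos ⟨by omega, by rw [← pvCell_eq_getElem g j t hk]; exact h1, h2⟩]
  · rw [List.getElem?_set_ne (fun hx => htk hx.symm)]
    simp only [pvRowK, List.getElem?_mapIdx]
    by_cases hlen : t < (g.getD j []).length
    · rw [List.getElem?_eq_getElem hlen]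
      simp only [Option.map_some, Option.some.injEq]
      simp only [show (t < k + 1) ↔ (t < k) from by omega]
    · rw [List.getElem?_eq_none (le_of_not_gt hlen)]
      rfl

lemma pvInner (g : List (List String)) (m n j : Nat) (r : Int) (out : List (List String))
    (hrow : out.getD j [] = g.getD j []) (k : Nat) :
    (List.range k).foldl (pvStepA g m n j) (r, out) =
      (r + (((List.range k).countP (pvDoom g m n j) : Nat) : Int),
        out.set j (pvRowK g m n j k (g.getD j []))) := by
  induction k with
  | zero =>
    simp only [List.range_zero, List.foldl_nil, List.countP_nil, Nat.cast_zero, add_zero,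
      pvRowK_zero]
    rw [← hrow, pvSetGetDSelf]
  | succ k ih =>
    rw [List.range_succ, List.foldl_append, ih, List.foldl_cons, List.foldl_nil]
    unfold pvStepA
    by_cases h1 : pvCell g j k = "@"
    · by_cases h2 : pvCnt g m n j k < 4
      · rw [if_neg (by simpa using h1), if_pos h2]
        have hjo : j < out.length := by
          apply pvGetDLt out j []
          rw [hrow]
          intro hemp
          have := (pvCell_spec g j k h1).2
          rw [hemp] at this; simp at this
        have hget : ((out.set j (pvRowK g m n j k (g.getD j []))).getD j []) =
            pvRowK g m n j k (g.getD j []) := by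
          simp [List.getD_eq_getElem?_getD, List.getElem?_set_self hjo]
        simp only [hget, List.set_set]
        rw [← pvRowK_succ_doom g m n j k h1 h2]
        have hcnt : (List.range k ++ [k]).countP (pvDoom g m n j) =
            (List.range k).countP (pvDoom g m n j) + 1 := by
          simp [List.countP_append, List.countP_cons, pvDoom, h1, h2]
        rw [hcnt]
        simp only [Prod.mk.injEq]
        exact ⟨by push_cast; ring, trivial⟩
      · rw [if_neg (by simpa using h1), if_neg h2]
        have hcnt : (List.range k ++ [k]).countP (pvDoom g m n j) =
            (List.range k).countP (pvDoom g m n j) := by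
          simp [List.countP_append, pvDoom, h2]
        rw [hcnt, pvRowK_succ_not g m n j k (fun hx => h2 hx.2)]
    · rw [if_pos (by simpa using h1)]
      have hcnt : (List.range k ++ [k]).countP (pvDoom g m n j) =
          (List.range k).countP (pvDoom g m n j) := by
        simp [List.countP_append, pvDoom, h1]
      rw [hcnt, pvRowK_succ_not g m n j k (fun hx => h1 hx.1)]

lemma pvOuter (g : List (List String)) (n : Nat) (k : Nat) (hk : k ≤ g.length) :
    (List.range k).foldl
      (fun st j => (List.range n).foldl (pvStepA g g.length n j) st) (0, g) =
      (((((List.range k).map (fun j => (List.range n).countP (pvDoom g g.length n j))).sum : Nat) : Int),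
        g.mapIdx (fun j row => if j < k then pvRowK g g.length n j n row else row)) := by
  induction k with
  | zero =>
    simp only [List.range_zero, List.foldl_nil, List.map_nil, List.sum_nil, Nat.cast_zero,
      Prod.mk.injEq]
    refine ⟨trivial, ?_⟩
    apply List.ext_getElem?
    intro t
    simp [List.getElem?_mapIdx]
  | succ k ih =>
    have hk' : k < g.length := by omega
    rw [List.range_succ, List.foldl_append, ih (by omega), List.foldl_cons, List.foldl_nil]
    have hrow : (g.mapIdx (fun j row => if j < k then pvRowK g g.length n j n row else row)).getD
        k [] = g.getD k [] := by
      rw [pvGetDS _ _ _ (by simpa using hk'), pvGetDS _ _ _ hk']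
      simp [List.getElem_mapIdx]
    rw [pvInner g g.length n k _ _ hrow n]
    simp only [Prod.mk.injEq]
    constructor
    · rw [List.map_append, List.sum_append]
      push_cast
      simp
    · apply List.ext_getElem?
      intro t
      by_cases htk : t = k
      · subst htk
        rw [List.getElem?_set_self (by simpa using hk')]
        rw [List.getElem?_mapIdx, List.getElem?_eq_getElem hk']
        simp only [Option.map_some, Option.some.injEq]
        rw [if_pos (by omega), pvGetDS _ _ _ hk']
      · rw [List.getElem?_set_ne (fun hx => htk hx.symm), List.getElem?_mapIdx,
          List.getElem?_mapIdx]
        by_cases hlen : t < g.length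
        · rw [List.getElem?_eq_getElem hlen]
          simp only [Option.map_some, Option.some.injEq]
          simp only [show (t < k + 1) ↔ (t < k) from by omega]
        · rw [List.getElem?_eq_none (le_of_not_gt hlen)]
          rfl

def pvDoomCount (g : List (List String)) : Nat :=
  ((List.range g.length).map
    (fun j => (List.range (g.headD []).length).countP (pvDoom g g.length (g.headD []).length j))).sum

lemma part_one_char (g : List (List String)) :
    part_one g = (((pvDoomCount g : Nat) : Int), pvPeel g) := by
  rw [part_one, pvOuter g (g.headD []).length g.length le_rfl]
  simp only [Prod.mk.injEq, pvDoomCount, pvPeel]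
  refine ⟨trivial, ?_⟩
  apply List.ext_getElem?
  intro t
  rw [List.getElem?_mapIdx, List.getElem?_mapIdx]
  by_cases hlen : t < g.length
  · rw [List.getElem?_eq_getElem hlen]
    simp only [Option.map_some, Option.some.injEq]
    rw [if_pos hlen]
  · rw [List.getElem?_eq_none (le_of_not_gt hlen)]
    rfl

lemma mem_pvCells (g : List (List String)) (c : Int × Int) :
    c ∈ pvCells g ↔ 0 ≤ c.1 ∧ c.1 < (g.length : Int) ∧ 0 ≤ c.2 ∧
      c.2 < ((g.headD []).length : Int) ∧ pvCell g c.1.toNat c.2.toNat = "@" := by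
  obtain ⟨a, b⟩ := c
  constructor
  · intro hmem
    obtain ⟨j, hj, hmem2⟩ := List.mem_flatMap.mp hmem
    obtain ⟨i, hi2, heq⟩ := List.mem_map.mp hmem2
    obtain ⟨hi3, hc⟩ := List.mem_filter.mp hi2
    rw [List.mem_range] at hj hi3
    obtain ⟨h1, h2⟩ : (j : Int) = a ∧ (i : Int) = b :=
      ⟨congrArg Prod.fst heq, congrArg Prod.snd heq⟩
    subst h1; subst h2
    exact ⟨by omega, by omega, by omega, by omega, by simpa using hc⟩
  · rintro ⟨h1, h2, h3, h4, h5⟩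
    exact List.mem_flatMap.mpr ⟨a.toNat, List.mem_range.mpr (by omega),
      List.mem_map.mpr ⟨b.toNat,
        List.mem_filter.mpr ⟨List.mem_range.mpr (by omega), by simpa using h5⟩,
        by simp [Int.toNat_of_nonneg h1, Int.toNat_of_nonneg h3]⟩⟩

lemma pvTermEq (g : List (List String)) (j i : Nat) (dj di : Int) (P : Prop) [Decidable P]
    (h : (0 ≤ (j : Int) + dj ∧ (j : Int) + dj < (g.length : Int) ∧ 0 ≤ (i : Int) + di ∧
          (i : Int) + di < ((g.headD []).length : Int) ∧
          pvCell g ((j : Int) + dj).toNat ((i : Int) + di).toNat = "@") ↔ P) :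
    (if 0 ≤ (j : Int) + dj ∧ (j : Int) + dj < (g.length : Int) ∧ 0 ≤ (i : Int) + di ∧
        (i : Int) + di < ((g.headD []).length : Int) ∧
        pvCell g ((j : Int) + dj).toNat ((i : Int) + di).toNat = "@"
     then (1 : Nat) else 0) = (if P then 1 else 0) := if_congr h rfl rfl

lemma cnt_eq_deg (g : List (List String)) (j i : Nat) (hj : j < g.length)
    (hi : i < (g.headD []).length) :
    pvCnt g g.length (g.headD []).length j i = pvDeg (pvCells g) ((j : Int), (i : Int)) := by
  rw [pvCnt, pvDeg, pvOffs]
  simp only [List.countP_cons, List.countP_nil, decide_eq_true_eq, mem_pvCells]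
  rw [pvTermEq g j i (-1) (-1) (0 < j ∧ 0 < i ∧ pvCell g (j - 1) (i - 1) = "@") (by
    constructor
    · rintro ⟨p1, p2, p3, p4, p5⟩
      have t1 : ((j : Int) + (-1)).toNat = j - 1 := by omega
      have t2 : ((i : Int) + (-1)).toNat = i - 1 := by omega
      rw [t1, t2] at p5
      exact ⟨by omega, by omega, p5⟩
    · rintro ⟨q1, q2, q5⟩
      have t1 : ((j : Int) + (-1)).toNat = j - 1 := by omega
      have t2 : ((i : Int) + (-1)).toNat = i - 1 := by omega
      refine ⟨by omega, by omega, by omega, by omega, ?_⟩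
      rw [t1, t2]
      exact q5)]
  rw [pvTermEq g j i (-1) 0 (0 < j ∧ pvCell g (j - 1) i = "@") (by
    constructor
    · rintro ⟨p1, p2, p3, p4, p5⟩
      have t1 : ((j : Int) + (-1)).toNat = j - 1 := by omega
      have t2 : ((i : Int) + 0).toNat = i := by omega
      rw [t1, t2] at p5
      exact ⟨by omega, p5⟩
    · rintro ⟨q1, q5⟩
      have t1 : ((j : Int) + (-1)).toNat = j - 1 := by omega
      have t2 : ((i : Int) + 0).toNat = i := by omega
      refine ⟨by omega, by omega, by omega, by omega, ?_⟩
      rw [t1, t2]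
      exact q5)]
  rw [pvTermEq g j i (-1) 1 (0 < j ∧ i < (g.headD []).length - 1 ∧ pvCell g (j - 1) (i + 1) = "@") (by
    constructor
    · rintro ⟨p1, p2, p3, p4, p5⟩
      have t1 : ((j : Int) + (-1)).toNat = j - 1 := by omega
      have t2 : ((i : Int) + 1).toNat = i + 1 := by omega
      rw [t1, t2] at p5
      exact ⟨by omega, by omega, p5⟩
    · rintro ⟨q1, q2, q5⟩
      have t1 : ((j : Int) + (-1)).toNat = j - 1 := by omega
      have t2 : ((i : Int) + 1).toNat = i + 1 := by omega
      refine ⟨by omega, by omega, by omega, by omega, ?_⟩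
      rw [t1, t2]
      exact q5)]
  rw [pvTermEq g j i 0 (-1) (0 < i ∧ pvCell g j (i - 1) = "@") (by
    constructor
    · rintro ⟨p1, p2, p3, p4, p5⟩
      have t1 : ((j : Int) + 0).toNat = j := by omega
      have t2 : ((i : Int) + (-1)).toNat = i - 1 := by omega
      rw [t1, t2] at p5
      exact ⟨by omega, p5⟩
    · rintro ⟨q1, q5⟩
      have t1 : ((j : Int) + 0).toNat = j := by omega
      have t2 : ((i : Int) + (-1)).toNat = i - 1 := by omega
      refine ⟨by omega, by omega, by omega, by omega, ?_⟩
      rw [t1, t2]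
      exact q5)]
  rw [pvTermEq g j i 0 1 (i < (g.headD []).length - 1 ∧ pvCell g j (i + 1) = "@") (by
    constructor
    · rintro ⟨p1, p2, p3, p4, p5⟩
      have t1 : ((j : Int) + 0).toNat = j := by omega
      have t2 : ((i : Int) + 1).toNat = i + 1 := by omega
      rw [t1, t2] at p5
      exact ⟨by omega, p5⟩
    · rintro ⟨q1, q5⟩
      have t1 : ((j : Int) + 0).toNat = j := by omega
      have t2 : ((i : Int) + 1).toNat = i + 1 := by omega
      refine ⟨by omega, by omega, by omega, by omega, ?_⟩
      rw [t1, t2]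
      exact q5)]
  rw [pvTermEq g j i 1 (-1) (j < g.length - 1 ∧ 0 < i ∧ pvCell g (j + 1) (i - 1) = "@") (by
    constructor
    · rintro ⟨p1, p2, p3, p4, p5⟩
      have t1 : ((j : Int) + 1).toNat = j + 1 := by omega
      have t2 : ((i : Int) + (-1)).toNat = i - 1 := by omega
      rw [t1, t2] at p5
      exact ⟨by omega, by omega, p5⟩
    · rintro ⟨q1, q2, q5⟩
      have t1 : ((j : Int) + 1).toNat = j + 1 := by omega
      have t2 : ((i : Int) + (-1)).toNat = i - 1 := by omega
      refine ⟨by omega, by omega, by omega, by omega, ?_⟩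
      rw [t1, t2]
      exact q5)]
  rw [pvTermEq g j i 1 0 (j < g.length - 1 ∧ pvCell g (j + 1) i = "@") (by
    constructor
    · rintro ⟨p1, p2, p3, p4, p5⟩
      have t1 : ((j : Int) + 1).toNat = j + 1 := by omega
      have t2 : ((i : Int) + 0).toNat = i := by omega
      rw [t1, t2] at p5
      exact ⟨by omega, p5⟩
    · rintro ⟨q1, q5⟩
      have t1 : ((j : Int) + 1).toNat = j + 1 := by omega
      have t2 : ((i : Int) + 0).toNat = i := by omega
      refine ⟨by omega, by omega, by omega, by omega, ?_⟩
      rw [t1, t2]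
      exact q5)]
  rw [pvTermEq g j i 1 1 (j < g.length - 1 ∧ i < (g.headD []).length - 1 ∧ pvCell g (j + 1) (i + 1) = "@") (by
    constructor
    · rintro ⟨p1, p2, p3, p4, p5⟩
      have t1 : ((j : Int) + 1).toNat = j + 1 := by omega
      have t2 : ((i : Int) + 1).toNat = i + 1 := by omega
      rw [t1, t2] at p5
      exact ⟨by omega, by omega, p5⟩
    · rintro ⟨q1, q2, q5⟩
      have t1 : ((j : Int) + 1).toNat = j + 1 := by omega
      have t2 : ((i : Int) + 1).toNat = i + 1 := by omega
      refine ⟨by omega, by omega, by omega, by omega, ?_⟩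
      rw [t1, t2]
      exact q5)]
  ring

lemma pvFilterKey (g : List (List String)) (p : Int × Int → Bool)
    (hp : ∀ j i, j < g.length → i < (g.headD []).length →
      p ((j : Int), (i : Int)) = decide (pvCnt g g.length (g.headD []).length j i < 4)) :
    ((pvCells g).filter p).length = pvDoomCount g := by
  rw [pvCells, List.filter_flatMap, List.length_flatMap, pvDoomCount]
  apply congrArg List.sum
  apply List.map_congr_left
  intro j hj
  rw [List.mem_range] at hj
  rw [List.filter_map, List.length_map, List.filter_filter]
  rw [List.countP_eq_length_filter]
  apply congrArg List.length
  apply List.filter_congr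
  intro i hi
  rw [List.mem_range] at hi
  simp [pvDoom, hp j i hj hi, Bool.and_comm]

lemma doomCount_eq (g : List (List String)) :
    pvDoomCount g = ((pvCells g).filter (fun c => decide (pvDeg (pvCells g) c < 4))).length := by
  refine (pvFilterKey g _ ?_).symm
  intro j i hj hi
  rw [cnt_eq_deg g j i hj hi]

lemma length_peel (g : List (List String)) : (pvPeel g).length = g.length := by
  simp [pvPeel]

lemma headLen_peel (g : List (List String)) :
    ((pvPeel g).headD []).length = (g.headD []).length := by
  cases g with
  | nil => rfl
  | cons row tl => simp [pvPeel, pvRowK]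

lemma cell_peel (g : List (List String)) (j i : Nat) :
    pvCell (pvPeel g) j i =
      if i < (g.headD []).length ∧ pvDoom g g.length (g.headD []).length j i then "x"
      else pvCell g j i := by
  by_cases hj : j < g.length
  · rw [pvCell, pvGetDS (pvPeel g) j [] (by simpa [length_peel] using hj)]
    rw [show (pvPeel g)[j]'(by simpa [length_peel] using hj) =
        pvRowK g g.length (g.headD []).length j (g.headD []).length (g[j]'hj) from by
      simp [pvPeel, List.getElem_mapIdx]]
    rw [pvRowK]
    have hrow : g.getD j [] = g[j]'hj := pvGetDS _ _ _ hj
    by_cases hi : i < (g[j]'hj).length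
    · rw [pvGetDS _ i "" (by simpa using hi), List.getElem_mapIdx]
      have hcell : pvCell g j i = (g[j]'hj)[i]'hi := by
        rw [pvCell, hrow, pvGetDS _ _ _ hi]
      rw [pvDoom, ← hcell]
      by_cases h1 : i < (g.headD []).length
      · by_cases h2 : pvCell g j i = "@"
        · by_cases h3 : pvCnt g g.length (g.headD []).length j i < 4
          · rw [if_pos ⟨h1, h2, h3⟩, if_pos ⟨h1, by rw [h2]; simpa using h3⟩]
          · rw [if_neg (fun hx => h3 hx.2.2), if_neg (fun hx => h3 (by simpa [h2] using hx.2))]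
        · rw [if_neg (fun hx => h2 hx.2.1), if_neg (fun hx => by simp [h2] at hx)]
      · rw [if_neg (fun hx => h1 hx.1), if_neg (fun hx => h1 hx.1)]
    · rw [pvGetDN _ i "" (by simpa using (le_of_not_gt hi))]
      have hcell : pvCell g j i = "" := by
        rw [pvCell, hrow, pvGetDN _ _ _ (le_of_not_gt hi)]
      rw [hcell, if_neg]
      rintro ⟨-, hd⟩
      rw [pvDoom, hcell] at hd
      simp at hd
  · have h1 : pvCell (pvPeel g) j i = "" := by
      rw [pvCell, pvGetDN (pvPeel g) j [] (by simpa [length_peel] using le_of_not_gt hj)]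
      simp
    have h2 : pvCell g j i = "" := by
      rw [pvCell, pvGetDN g j [] (le_of_not_gt hj)]
      simp
    rw [h1, h2, if_neg]
    rintro ⟨-, hd⟩
    rw [pvDoom, h2] at hd
    simp at hd

lemma pvCellsPeelKey (g : List (List String)) (p : Int × Int → Bool)
    (hp : ∀ j i, j < g.length → i < (g.headD []).length →
      (pvCell (pvPeel g) j i == "@") = ((pvCell g j i == "@") && p ((j : Int), (i : Int)))) :
    pvCells (pvPeel g) = (pvCells g).filter p := by
  rw [show pvCells (pvPeel g) =
      (List.range g.length).flatMap (fun j =>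
        ((List.range (g.headD []).length).filter
          (fun i => pvCell (pvPeel g) j i == "@")).map
          (fun (i : Nat) => ((j : Int), (i : Int)))) from by
    rw [pvCells, length_peel, headLen_peel]]
  rw [pvCells, List.filter_flatMap, List.flatMap_def, List.flatMap_def]
  apply congrArg List.flatten
  apply List.map_congr_left
  intro j hj
  rw [List.mem_range] at hj
  rw [List.filter_map, List.filter_filter]
  apply congrArg (List.map _)
  apply List.filter_congr
  intro i hi
  rw [List.mem_range] at hi
  have h := hp j i hj hi
  simp only [Function.comp_apply]
  rw [h, Bool.and_comm]

lemma cells_peel (g : List (List String)) :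
    pvCells (pvPeel g) = (pvCells g).filter (fun c => decide (¬ pvDeg (pvCells g) c < 4)) := by
  apply pvCellsPeelKey
  intro j i hj hi
  have hd := cnt_eq_deg g j i hj hi
  set n := (g.headD []).length with hn
  rw [cell_peel g j i, ← hd, ← hn]
  by_cases h2 : pvCell g j i = "@"
  · by_cases h3 : pvCnt g g.length n j i < 4
    · rw [if_pos ⟨hi, by simp [pvDoom, h2, h3]⟩]
      simp [h2, h3]
    · rw [if_neg (fun hx => h3 (by simpa [pvDoom, ← hn, h2] using hx.2))]
      simp [h2, h3]
  · rw [if_neg (fun hx => h2 (And.left (by simpa [pvDoom, ← hn] using hx.2)))]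
    simp [h2]

lemma pvMain (N : Nat) : ∀ (g : List (List String)) (rolls : Int),
    (pvCells g).length ≤ N → part_two_go g rolls = pvRounds (pvCells g) rolls := by
  induction N with
  | zero =>
    intro g rolls hlen
    have hS : pvCells g = [] := List.eq_nil_of_length_eq_zero (by omega)
    have h0 : pvDoomCount g = 0 := by rw [doomCount_eq, hS]; rfl
    rw [part_two_go, pvRounds, part_one_char]
    simp [hS, h0]
  | succ N ih =>
    intro g rolls hlen
    rw [part_two_go, pvRounds, part_one_char]
    by_cases hD : ((pvCells g).filter (fun c => decide (pvDeg (pvCells g) c < 4))).isEmpty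
    · have h0 : pvDoomCount g = 0 := by
        rw [doomCount_eq, List.isEmpty_iff.mp hD]
        rfl
      simp [hD, h0]
    · have hne : (pvCells g).filter (fun c => decide (pvDeg (pvCells g) c < 4)) ≠ [] := by
        simpa [List.isEmpty_iff] using hD
      have h0 : pvDoomCount g ≠ 0 := by
        rw [doomCount_eq]
        simpa using List.length_pos_of_ne_nil hne
      have hlt : ((pvCells g).filter (fun c => decide (¬ pvDeg (pvCells g) c < 4))).length <
          (pvCells g).length := by
        apply List.length_filter_lt_length_iff_exists.mpr
        obtain ⟨x, hx⟩ := List.exists_mem_of_ne_nil _ hne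
        obtain ⟨hxS, hxd⟩ := List.mem_filter.mp hx
        exact ⟨x, hxS, by simpa using hxd⟩
      rw [if_neg (by simpa using h0), if_neg hD]
      rw [dif_pos (by rw [cells_peel]; exact hlt), dif_pos hlt]
      rw [ih (pvPeel g) _ (by rw [cells_peel]; omega)]
      rw [cells_peel, doomCount_eq]

-- ---- 4-core theory: pvFix is the unique maximal subset with all degrees ≥ 4 ----

lemma deg_mono (T S : List (Int × Int)) (h : ∀ x ∈ T, x ∈ S) (c : Int × Int) :
    pvDeg T c ≤ pvDeg S c := by
  apply List.countP_mono_left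
  intro o _ ho
  simp only [decide_eq_true_eq] at *
  exact h _ ho

lemma fix_subset : ∀ (N : Nat) (S : List (Int × Int)), S.length ≤ N →
    ∀ x ∈ pvFix S, x ∈ S := by
  intro N
  induction N with
  | zero =>
    intro S hlen x hx
    have hS : S = [] := List.eq_nil_of_length_eq_zero (by omega)
    subst hS
    rw [pvFix] at hx
    simpa using hx
  | succ N ih =>
    intro S hlen x hx
    rw [pvFix] at hx
    split at hx
    · exact hx
    · next hD =>
      have hlt : (S.filter (fun c => decide (¬ pvDeg S c < 4))).length < S.length := by
        obtain ⟨y, hy⟩ := List.exists_mem_of_ne_nil _ hD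
        obtain ⟨hyS, hyd⟩ := List.mem_filter.mp hy
        exact List.length_filter_lt_length_iff_exists.mpr ⟨y, hyS, by simpa using hyd⟩
      exact List.mem_of_mem_filter (ih _ (by omega) x hx)

lemma fix_good : ∀ (N : Nat) (S : List (Int × Int)), S.length ≤ N →
    ∀ x ∈ pvFix S, ¬ pvDeg (pvFix S) x < 4 := by
  intro N
  induction N with
  | zero =>
    intro S hlen x hx
    have hS : S = [] := List.eq_nil_of_length_eq_zero (by omega)
    subst hS
    rw [pvFix] at hx
    simp at hx
  | succ N ih =>
    intro S hlen x hx
    rw [pvFix] at hx ⊢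
    split at hx <;> split
    · next hD _ =>
      intro hlt4
      have hxS := hx
      have : x ∈ S.filter (fun c => decide (pvDeg S c < 4)) :=
        List.mem_filter.mpr ⟨hxS, by simpa using hlt4⟩
      rw [hD] at this
      simp at this
    · next h1 h2 => exact absurd h1 h2
    · next h1 h2 => exact absurd h2 h1
    · next hD _ =>
      have hlt : (S.filter (fun c => decide (¬ pvDeg S c < 4))).length < S.length := by
        obtain ⟨y, hy⟩ := List.exists_mem_of_ne_nil _ hD
        obtain ⟨hyS, hyd⟩ := List.mem_filter.mp hy
        exact List.length_filter_lt_length_iff_exists.mpr ⟨y, hyS, by simpa using hyd⟩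
      exact ih _ (by omega) x hx

lemma fix_max : ∀ (N : Nat) (S : List (Int × Int)), S.length ≤ N →
    ∀ (T : List (Int × Int)), (∀ x ∈ T, x ∈ S) → (∀ x ∈ T, ¬ pvDeg T x < 4) →
    ∀ x ∈ T, x ∈ pvFix S := by
  intro N
  induction N with
  | zero =>
    intro S hlen T hTS _ x hx
    have hS : S = [] := List.eq_nil_of_length_eq_zero (by omega)
    subst hS
    exact absurd (hTS x hx) (by simp)
  | succ N ih =>
    intro S hlen T hTS hTgood x hx
    rw [pvFix]
    split
    · exact hTS x hx
    · next hD =>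
      have hlt : (S.filter (fun c => decide (¬ pvDeg S c < 4))).length < S.length := by
        obtain ⟨y, hy⟩ := List.exists_mem_of_ne_nil _ hD
        obtain ⟨hyS, hyd⟩ := List.mem_filter.mp hy
        exact List.length_filter_lt_length_iff_exists.mpr ⟨y, hyS, by simpa using hyd⟩
      refine ih _ (by omega) T (fun y hy => ?_) hTgood x hx
      refine List.mem_filter.mpr ⟨hTS y hy, ?_⟩
      have h4 : ¬ pvDeg T y < 4 := hTgood y hy
      have hm : pvDeg T y ≤ pvDeg S y := deg_mono T S hTS y
      simpa using (by omega : ¬ pvDeg S y < 4)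

lemma fix_nodup : ∀ (N : Nat) (S : List (Int × Int)), S.length ≤ N → S.Nodup →
    (pvFix S).Nodup := by
  intro N
  induction N with
  | zero =>
    intro S hlen hnd
    have hS : S = [] := List.eq_nil_of_length_eq_zero (by omega)
    subst hS
    rw [pvFix]
    simp
  | succ N ih =>
    intro S hlen hnd
    rw [pvFix]
    split
    · exact hnd
    · next hD =>
      have hlt : (S.filter (fun c => decide (¬ pvDeg S c < 4))).length < S.length := by
        obtain ⟨y, hy⟩ := List.exists_mem_of_ne_nil _ hD
        obtain ⟨hyS, hyd⟩ := List.mem_filter.mp hy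
        exact List.length_filter_lt_length_iff_exists.mpr ⟨y, hyS, by simpa using hyd⟩
      exact ih _ (by omega) (hnd.filter _)

-- removing one deficient cell does not change the 4-core (order-independence)
lemma fix_erase (S : List (Int × Int)) (c : Int × Int) (hnd : S.Nodup) (hc : c ∈ S)
    (hd : pvDeg S c < 4) : (pvFix (S.erase c)).length = (pvFix S).length := by
  have hsubS : ∀ x ∈ pvFix S, x ∈ S := fix_subset S.length S le_rfl
  have hgoodS : ∀ x ∈ pvFix S, ¬ pvDeg (pvFix S) x < 4 := fix_good S.length S le_rfl
  have hcnot : c ∉ pvFix S := by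
    intro hcf
    have := deg_mono (pvFix S) S hsubS c
    exact hgoodS c hcf (by omega)
  have hmemE : ∀ x, x ∈ S.erase c ↔ x ≠ c ∧ x ∈ S := fun x => hnd.mem_erase_iff
  have hfwd : ∀ x ∈ pvFix (S.erase c), x ∈ pvFix S := by
    apply fix_max S.length S le_rfl
    · intro x hx
      exact ((hmemE x).mp (fix_subset (S.erase c).length (S.erase c) le_rfl x hx)).2
    · exact fix_good (S.erase c).length (S.erase c) le_rfl
  have hbwd : ∀ x ∈ pvFix S, x ∈ pvFix (S.erase c) := by
    apply fix_max (S.erase c).length (S.erase c) le_rfl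
    · intro x hx
      exact (hmemE x).mpr ⟨fun he => hcnot (he ▸ hx), hsubS x hx⟩
    · exact hgoodS
  have hnd1 : (pvFix (S.erase c)).Nodup :=
    fix_nodup (S.erase c).length (S.erase c) le_rfl (hnd.erase c)
  have hnd2 : (pvFix S).Nodup := fix_nodup S.length S le_rfl hnd
  exact List.Perm.length_eq
    ((List.perm_ext_iff_of_nodup hnd1 hnd2).mpr (fun a => ⟨hfwd a, hbwd a⟩))

lemma fix_length_le (S : List (Int × Int)) : (pvFix S).length ≤ S.length := by
  suffices h : ∀ (N : Nat) (S : List (Int × Int)), S.length ≤ N → (pvFix S).length ≤ S.length from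
    h S.length S le_rfl
  intro N
  induction N with
  | zero =>
    intro S hlen
    have hS : S = [] := List.eq_nil_of_length_eq_zero (by omega)
    subst hS
    rw [pvFix]
    simp
  | succ N ih =>
    intro S hlen
    rw [pvFix]
    split
    · exact le_rfl
    · next hD =>
      have hlt : (S.filter (fun c => decide (¬ pvDeg S c < 4))).length < S.length := by
        obtain ⟨y, hy⟩ := List.exists_mem_of_ne_nil _ hD
        obtain ⟨hyS, hyd⟩ := List.mem_filter.mp hy
        exact List.length_filter_lt_length_iff_exists.mpr ⟨y, hyS, by simpa using hyd⟩
      exact le_trans (ih _ (by omega)) (le_of_lt hlt)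

-- ---- the round loop computes |S| - |core| ----

lemma pvRoundsFix : ∀ (N : Nat) (S : List (Int × Int)) (r : Int), S.length ≤ N →
    pvRounds S r = r + (S.length : Int) - ((pvFix S).length : Int) := by
  intro N
  induction N with
  | zero =>
    intro S r hlen
    have hS : S = [] := List.eq_nil_of_length_eq_zero (by omega)
    subst hS
    rw [pvRounds, pvFix]
    simp
  | succ N ih =>
    intro S r hlen
    rw [pvRounds, pvFix]
    by_cases hD : (S.filter (fun c => decide (pvDeg S c < 4))) = []
    · rw [if_pos (by simpa [List.isEmpty_iff] using hD), dif_pos hD]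
      omega
    · have hlt : (S.filter (fun c => decide (¬ pvDeg S c < 4))).length < S.length := by
        obtain ⟨y, hy⟩ := List.exists_mem_of_ne_nil _ hD
        obtain ⟨hyS, hyd⟩ := List.mem_filter.mp hy
        exact List.length_filter_lt_length_iff_exists.mpr ⟨y, hyS, by simpa using hyd⟩
      rw [if_neg (by simpa [List.isEmpty_iff] using hD), dif_neg hD, dif_pos hlt]
      rw [ih _ _ (by omega)]
      have hsplit : (S.filter (fun c => decide (pvDeg S c < 4))).length +
          (S.filter (fun c => decide (¬ pvDeg S c < 4))).length = S.length := by
        rw [← List.countP_eq_length_filter, ← List.countP_eq_length_filter]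
        have := List.length_eq_countP_add_countP (l := S)
          (p := fun c => decide (pvDeg S c < 4))
        rw [this]
        congr 1
        apply List.countP_congr
        intro a _
        simp
      omega

-- ---- the worklist loop computes |live| - |core| ----

lemma pvLoop : ∀ (N : Nat) (live stack : List (Int × Int)) (removed : Int),
    9 * live.length + stack.length ≤ N → live.Nodup →
    (∀ x ∈ live, pvDeg live x < 4 → x ∈ stack) →
    (∀ x ∈ stack, x ∈ live → pvDeg live x < 4) →
    part_two_alt_go live stack removed =
      removed + (live.length : Int) - ((pvFix live).length : Int) := by
  intro N
  induction N with
  | zero =>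
    intro live stack removed hN hnd hInv1 hInv2
    have hst : stack = [] := List.eq_nil_of_length_eq_zero (by omega)
    have hlv : live = [] := List.eq_nil_of_length_eq_zero (by omega)
    subst hst; subst hlv
    rw [part_two_alt_go, pvFix]
    simp
  | succ N ih =>
    intro live stack removed hN hnd hInv1 hInv2
    match stack with
    | [] =>
      rw [part_two_alt_go]
      have hD : (live.filter (fun c => decide (pvDeg live c < 4))) = [] := by
        rw [List.filter_eq_nil_iff]
        intro a ha
        simp only [decide_eq_true_eq]
        intro h4
        exact absurd (hInv1 a ha h4) (List.not_mem_nil)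
      rw [pvFix, dif_pos hD]
      omega
    | c :: rest =>
      rw [part_two_alt_go]
      by_cases hc : c ∈ live
      · rw [if_pos hc]
        have hdc : pvDeg live c < 4 := hInv2 c (List.mem_cons_self) hc
        set live' := live.erase c with hlive'
        set P := (pvOffs.map (fun o => (c.1 + o.1, c.2 + o.2))).filter
            (fun nb => decide (nb ∈ live' ∧ pvDeg live' nb < 4)) with hP
        have hlenE : live'.length = live.length - 1 := List.length_erase_of_mem hc
        have hlpos : 0 < live.length := List.length_pos_of_mem hc
        have hPle : P.length ≤ pvOffs.length := by
          rw [hP]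
          exact le_trans (List.length_filter_le _ _) (le_of_eq (List.length_map _))
        have hmemE : ∀ x, x ∈ live' ↔ x ≠ c ∧ x ∈ live := fun x => hnd.mem_erase_iff
        have hsubE : ∀ x ∈ live', x ∈ live := fun x hx => ((hmemE x).mp hx).2
        have hmemP : ∀ x, x ∈ P ↔
            (∃ o ∈ pvOffs, (c.1 + o.1, c.2 + o.2) = x) ∧ x ∈ live' ∧ pvDeg live' x < 4 := by
          intro x
          rw [hP, List.mem_filter, List.mem_map]
          simp only [decide_eq_true_eq]
        -- a cell whose degree drops when c is erased is one of c's 8 neighbours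
        have hnbr : ∀ x, pvDeg live' x ≠ pvDeg live x →
            ∃ o ∈ pvOffs, (c.1 + o.1, c.2 + o.2) = x := by
          intro x hne
          by_contra hno
          push_neg at hno
          apply hne
          unfold pvDeg
          apply List.countP_congr
          intro o ho
          simp only [decide_eq_true_eq]
          constructor
          · intro h; exact hsubE _ h
          · intro h
            rw [hmemE]
            refine ⟨fun heq => ?_, h⟩
            -- x + o = c; then c + (-o) = x, and -o ∈ pvOffs
            have hsym : ((-o.1, -o.2) : Int × Int) ∈ pvOffs := by
              rw [pvOffs] at ho ⊢
              fin_cases ho <;> decide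
            exact hno (-o.1, -o.2) hsym (by
              rw [← heq]
              obtain ⟨a, b⟩ := x
              obtain ⟨u, v⟩ := o
              simp only [Prod.mk.injEq]
              constructor <;> ring)
        rw [ih live' (P.reverse ++ rest) (removed + 1)
          (by simp only [List.length_append, List.length_reverse]
              have : pvOffs.length = 8 := by rw [pvOffs]; rfl
              simp only [List.length_cons] at hN
              omega)
          (hnd.erase c)
          (by -- Inv1
            intro x hx hdx
            rw [List.mem_append]
            by_cases hcase : pvDeg live x < 4
            · right
              have := hInv1 x (hsubE x hx) hcase
              rcases List.mem_cons.mp this with h | h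
              · exact absurd h ((hmemE x).mp hx).1
              · exact h
            · left
              rw [List.mem_reverse, hmemP]
              exact ⟨hnbr x (by omega), hx, hdx⟩)
          (by -- Inv2
            intro x hx hxl
            rcases List.mem_append.mp hx with h | h
            · exact (((hmemP x).mp (List.mem_reverse.mp h)).2).2
            · have h4 : pvDeg live x < 4 :=
                hInv2 x (List.mem_cons_of_mem _ h) (hsubE x hxl)
              have := deg_mono live' live hsubE x
              omega)]
        rw [fix_erase live c hnd hc hdc]
        have := fix_length_le live
        omega
      · rw [if_neg hc]
        apply ih live rest removed (by simp only [List.length_cons] at hN; omega) hnd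
        · intro x hx hdx
          rcases List.mem_cons.mp (hInv1 x hx hdx) with h | h
          · exact absurd (h ▸ hx) hc
          · exact h
        · intro x hx hxl
          exact hInv2 x (List.mem_cons_of_mem _ hx) hxl

lemma pvCells_nodup (g : List (List String)) : (pvCells g).Nodup := by
  rw [pvCells]
  refine List.nodup_flatMap.2 ⟨?_, ?_⟩
  · intro j _
    exact (List.nodup_range.filter _).map
      (fun a b h => Nat.cast_inj.mp (congrArg Prod.snd h))
  · refine List.nodup_range.imp ?_
    intro j1 j2 hne x hx1 hx2
    obtain ⟨i1, _, h1⟩ := List.mem_map.mp hx1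
    obtain ⟨i2, _, h2⟩ := List.mem_map.mp hx2
    exact hne (Nat.cast_inj.mp ((congrArg Prod.fst h1).trans (congrArg Prod.fst h2).symm))

-- ===== VERDICT (by name: the statement is the Claim_ definition above) =====
theorem part_two_spec : Claim_equal_part_two := by
  intro grid _ _
  show part_two grid = part_two_alt grid
  rw [part_two, part_two_alt]
  rw [pvMain (pvCells grid).length grid 0 le_rfl]
  rw [pvRoundsFix (pvCells grid).length (pvCells grid) 0 le_rfl]
  rw [pvLoop (9 * (pvCells grid).length +
        ((pvCells grid).filter (fun c => decide (pvDeg (pvCells grid) c < 4))).length)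
      _ _ _ le_rfl (pvCells_nodup grid)
      (fun x hx hdx => List.mem_filter.mpr ⟨hx, by simpa using hdx⟩)
      (fun x hx _ => by simpa using (List.mem_filter.mp hx).2)]
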